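-- pv_equiv track=rewrite | github.com/smyth78/tarsia_mod | helper_functions.py | generate_fields
-- ===== SOURCE A (Python) =====
-- def generate_fields(num_questions):
--     form_fields = []
--     for i in range(num_questions):
--         question_text_label = 'Q' + str(i + 1) + ' - Text'
--         question_math_label = 'Q' + str(i + 1) + ' - Math TeX'
--         answer_text_label = 'A' + str(i + 1) + ' - Text'
--         answer_math_label = 'A' + str(i + 1) + ' - Math Tex'
--         question_text_name = 'qt' + str(i + 1)
--         question_math_name = 'qm' + str(i + 1)
--         answer_text_name = 'at' + str(i + 1)
--         answer_math_name = 'am' + str(i + 1)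
--         new_question_text = {
--                       "tag": question_text_name,
--                       "name": question_text_name,
--                       "type": "text",
--                       "human_label": question_text_label
--                     }
--         new_question_math_tex = {
--                       "tag": question_math_name,
--                       "name": question_math_name,
--                       "type": "text",
--                       "human_label": question_math_label
--                     }
--         new_answer_text = {
--           "tag": answer_text_name,
--           "name": answer_text_name,
--           "type": "text",
--           "human_label": answer_text_label
--         }
--         new_answer_math_tex = {
--             "tag": answer_math_name,
--             "name": answer_math_name,
--             "type": "text",
--             "human_label": answer_math_label
--         }
--         form_fields.append(new_question_text)
--         form_fields.append(new_question_math_tex)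
--         form_fields.append(new_answer_text)
--         form_fields.append(new_answer_math_tex)
--     return form_fields
-- ===== SOURCE B (Python) =====
-- _SPEC = [('qt', 'Q', 'Text'), ('qm', 'Q', 'Math TeX'),
--          ('at', 'A', 'Text'), ('am', 'A', 'Math Tex')]
--
-- def generate_fields(num_questions):
--     return [
--         {
--             "tag": prefix + str(i + 1),
--             "name": prefix + str(i + 1),
--             "type": "text",
--             "human_label": label_prefix + str(i + 1) + ' - ' + label_suffix,
--         }
--         for i in range(num_questions)
--         for (prefix, label_prefix, label_suffix) in _SPEC
--     ]
-- ===== Notes on version B (the rewrite author's own statement) =====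
-- stated objective: simpler
-- what changed: Replaces the loop body that spells out eight label/name variables and four dict literals with a field-spec table (tag prefix, label prefix, label suffix) driving one nested comprehension that builds every dict from the same template.
import Mathlib
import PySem

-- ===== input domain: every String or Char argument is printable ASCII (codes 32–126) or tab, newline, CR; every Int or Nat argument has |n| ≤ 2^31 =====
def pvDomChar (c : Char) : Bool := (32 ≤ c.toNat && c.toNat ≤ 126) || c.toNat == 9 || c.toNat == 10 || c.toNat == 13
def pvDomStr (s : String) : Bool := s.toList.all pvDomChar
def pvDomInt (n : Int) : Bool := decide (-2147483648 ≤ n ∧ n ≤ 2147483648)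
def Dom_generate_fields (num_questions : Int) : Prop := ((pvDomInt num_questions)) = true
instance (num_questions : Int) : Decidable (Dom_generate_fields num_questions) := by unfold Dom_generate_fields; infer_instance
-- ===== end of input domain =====

-- B replaces A's eight hand-written label/name variables and four dict literals with a
-- 4-row field-spec table driving one nested comprehension; same output, simpler code.

-- ===== PORT A =====
def generate_fields (num_questions : Int) : List (List (String × String)) :=
  (PySem.List.pyRange 0 num_questions 1).foldl (fun form_fields i =>
    let question_text_label := "Q" ++ PySem.Int.toStr (i + 1) ++ " - Text"
    let question_math_label := "Q" ++ PySem.Int.toStr (i + 1) ++ " - Math TeX"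
    let answer_text_label := "A" ++ PySem.Int.toStr (i + 1) ++ " - Text"
    let answer_math_label := "A" ++ PySem.Int.toStr (i + 1) ++ " - Math Tex"
    let question_text_name := "qt" ++ PySem.Int.toStr (i + 1)
    let question_math_name := "qm" ++ PySem.Int.toStr (i + 1)
    let answer_text_name := "at" ++ PySem.Int.toStr (i + 1)
    let answer_math_name := "am" ++ PySem.Int.toStr (i + 1)
    let new_question_text : List (String × String) :=
      [("tag", question_text_name), ("name", question_text_name),
       ("type", "text"), ("human_label", question_text_label)]
    let new_question_math_tex : List (String × String) :=
      [("tag", question_math_name), ("name", question_math_name),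
       ("type", "text"), ("human_label", question_math_label)]
    let new_answer_text : List (String × String) :=
      [("tag", answer_text_name), ("name", answer_text_name),
       ("type", "text"), ("human_label", answer_text_label)]
    let new_answer_math_tex : List (String × String) :=
      [("tag", answer_math_name), ("name", answer_math_name),
       ("type", "text"), ("human_label", answer_math_label)]
    form_fields ++ [new_question_text] ++ [new_question_math_tex]
      ++ [new_answer_text] ++ [new_answer_math_tex]) []

-- ===== PORT B =====
def pvSpec : List (String × String × String) :=
  [("qt", "Q", "Text"), ("qm", "Q", "Math TeX"), ("at", "A", "Text"), ("am", "A", "Math Tex")]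

def generate_fields_alt (num_questions : Int) : List (List (String × String)) :=
  (PySem.List.pyRange 0 num_questions 1).flatMap (fun i =>
    pvSpec.map (fun spec =>
      [("tag", spec.1 ++ PySem.Int.toStr (i + 1)),
       ("name", spec.1 ++ PySem.Int.toStr (i + 1)),
       ("type", "text"),
       ("human_label", spec.2.1 ++ PySem.Int.toStr (i + 1) ++ " - " ++ spec.2.2)]))

-- ===== PRECONDITION & SPEC =====
def Spec_generate_fields (num_questions : Int) (out : List (List (String × String))) : Prop := out = generate_fields_alt num_questions
instance (num_questions : Int) (out : List (List (String × String))) : Decidable (Spec_generate_fields num_questions out) := by unfold Spec_generate_fields; infer_instance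

-- ===== CLAIM (what is proved, stated in full; the proofs are below) =====
def Claim_equal_generate_fields : Prop := ∀ (num_questions : Int), Dom_generate_fields num_questions → Spec_generate_fields num_questions (generate_fields num_questions)

-- ===== LEMMAS AND PROOFS =====

-- each iteration of A appends exactly the four dicts B's spec table produces for that i
theorem pv_step_eq (acc : List (List (String × String))) (i : Int) :
    (acc ++ [[("tag", "qt" ++ PySem.Int.toStr (i + 1)), ("name", "qt" ++ PySem.Int.toStr (i + 1)),
              ("type", "text"), ("human_label", "Q" ++ PySem.Int.toStr (i + 1) ++ " - Text")]]
         ++ [[("tag", "qm" ++ PySem.Int.toStr (i + 1)), ("name", "qm" ++ PySem.Int.toStr (i + 1)),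
              ("type", "text"), ("human_label", "Q" ++ PySem.Int.toStr (i + 1) ++ " - Math TeX")]]
         ++ [[("tag", "at" ++ PySem.Int.toStr (i + 1)), ("name", "at" ++ PySem.Int.toStr (i + 1)),
              ("type", "text"), ("human_label", "A" ++ PySem.Int.toStr (i + 1) ++ " - Text")]]
         ++ [[("tag", "am" ++ PySem.Int.toStr (i + 1)), ("name", "am" ++ PySem.Int.toStr (i + 1)),
              ("type", "text"), ("human_label", "A" ++ PySem.Int.toStr (i + 1) ++ " - Math Tex")]])
    = acc ++ pvSpec.map (fun spec =>
        [("tag", spec.1 ++ PySem.Int.toStr (i + 1)),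
         ("name", spec.1 ++ PySem.Int.toStr (i + 1)),
         ("type", "text"),
         ("human_label", spec.2.1 ++ PySem.Int.toStr (i + 1) ++ " - " ++ spec.2.2)]) := by
  have h1 : ∀ s : String, s ++ " - " ++ "Text" = s ++ " - Text" := fun s => by
    rw [String.append_assoc]; exact congrArg (s ++ ·) (by decide)
  have h2 : ∀ s : String, s ++ " - " ++ "Math TeX" = s ++ " - Math TeX" := fun s => by
    rw [String.append_assoc]; exact congrArg (s ++ ·) (by decide)
  have h3 : ∀ s : String, s ++ " - " ++ "Math Tex" = s ++ " - Math Tex" := fun s => by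
    rw [String.append_assoc]; exact congrArg (s ++ ·) (by decide)
  simp only [pvSpec, List.map_cons, List.map_nil, h1, h2, h3]
  simp

-- ===== VERDICT (by name: the statement is the Claim_ definition above) =====
theorem generate_fields_spec : Claim_equal_generate_fields := by
  intro n _
  show generate_fields n = generate_fields_alt n
  simp only [generate_fields, generate_fields_alt]
  have hstep := funext fun acc => funext fun i => pv_step_eq acc i
  rw [hstep, PySem.List.foldl_append_eq_flatMap]
  rfl
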